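-- pv_equiv track=rewrite | github.com/DiegoCard18/Teoria_cuantica_basica | libe.py | verifi_mat_unitary
-- ===== SOURCE A (Python) =====
-- def suma_complex(c1, c2):
--     re = c1[0] + c2[0]
--     im = c1[1] + c2[1]
--     resp = re, im
--     return resp
--
-- def umlti_complex(c1, c2):
--     re = c1[0]*c2[0] - c1[1]*c2[1]
--     im = c1[0]*c2[1] + c1[1]*c2[0]
--     resp = re, im
--     return resp
--
-- def verificar_longitud(v1, v2):
--     if len(v1) == len(v2):
--         return True
--     else:
--         return False
--
-- def mat_diagonal(m):
--     mI = [[(0, 0) for j in range(m)] for i in range(m)]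
--     for i in range(m):
--         for j in range(m):
--             if i == j:
--                 mI[i][j] = (1, 0)
--     return mI
--
-- def conjugar_vector(c1):
--     re = c1[0]
--     im = c1[1] * -1
--     res = re, im
--     return res
--
-- def at_transicion(m1):
--     m = [[(0, 0) for i in range(len(m1))] for j in range(len(m1[0]))]
--     for i in range(len(m1)):
--         for j in range(len(m1[0])):
--             m[j][i] = m1[i][j]
--     return m
--
-- def conjugar_matrix(m1):
--     m2 = [[(0, 0) for j in range(len(m1[0]))] for i in range(len(m1))]
--     for row in range(len(m1)):
--         for column in range(len(m1[0])):
--             m2[row][column] = conjugar_vector(m1[row][column])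
--     return m2
--
-- def matrix_daga(m1):
--     m2 = [[m1[i][j] for j in range(len(m1[0]))] for i in range(len(m1))]
--     m2 = conjugar_matrix(m2)
--     m2 = at_transicion(m2)
--     return m2
--
-- def mult_matrices(m1, m2):
--     if len(m1[0]) == len(m2):
--         m = [[(0, 0) for i in range(len(m2[0]))] for j in range(len(m1))]
--         for row in range(len(m1)):
--             for column in range(len(m2[0])):
--                 for aux in range(len(m1[0])):
--                     m[row][column] = suma_complex(m[row][column], umlti_complex(m1[row][aux], m2[aux][column]))
--         return m
--     else:
--         return "Length error"
--
-- def verifi_mat_unitary(m1):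
--     if verificar_longitud(m1, m1[0]):
--         maty = mat_diagonal((len(m1)))
--         m2 = matrix_daga(m1)
--         product = mult_matrices(m1, m2)
--         rest = True
--         for i in range(len(m1)):
--             for j in range(len(m1)):
--                 if product[i][j] != maty[i][j]:
--                     rest = False
--         if rest:
--             return True
--         else:
--             return False
--     else:
--         return False
-- ===== SOURCE B (Python) =====
-- def verifi_mat_unitary(m1):
--     n = len(m1)
--     if n != len(m1[0]):
--         return False
--     for i in range(n):
--         for j in range(n):
--             re, im = 0, 0
--             for k in range(n):
--                 a, b = m1[i][k]
--                 c, d = m1[j][k]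
--                 re = re + (a * c + b * d)
--                 im = im + (b * c - a * d)
--             want = (1, 0) if i == j else (0, 0)
--             if (re, im) != want:
--                 return False
--     return True
-- ===== Notes on version B (the rewrite author's own statement) =====
-- stated objective: simpler
-- what changed: B never materialises the dagger matrix, the identity matrix or the product: it computes each Hermitian row inner product sum_k m1[i][k]*conj(m1[j][k]) on the fly and compares it to (1,0)/(0,0) directly, returning False early on the first mismatch.
import Mathlib
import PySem

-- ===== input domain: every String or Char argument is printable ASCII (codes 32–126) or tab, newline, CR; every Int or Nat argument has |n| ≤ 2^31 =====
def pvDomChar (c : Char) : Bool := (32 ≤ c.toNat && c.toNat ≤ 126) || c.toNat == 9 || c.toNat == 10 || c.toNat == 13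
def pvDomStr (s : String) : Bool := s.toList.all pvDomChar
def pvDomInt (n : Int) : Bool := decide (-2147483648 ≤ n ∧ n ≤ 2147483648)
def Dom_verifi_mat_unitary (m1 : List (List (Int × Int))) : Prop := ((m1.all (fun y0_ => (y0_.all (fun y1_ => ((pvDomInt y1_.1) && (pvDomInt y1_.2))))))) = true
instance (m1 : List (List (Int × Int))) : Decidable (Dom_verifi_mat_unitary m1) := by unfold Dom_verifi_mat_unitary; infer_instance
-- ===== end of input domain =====

-- B fuses A's dagger/identity/product matrices into one direct scan of Hermitian
-- row inner products compared to (1,0)/(0,0), with early exit; same results on Pre_.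


-- ===== PORT A =====
-- All indexing in A is in range on admitted inputs; ported with getD (exact on in-range indices).
def suma_complex (c1 c2 : Int × Int) : Int × Int := (c1.1 + c2.1, c1.2 + c2.2)
def umlti_complex (c1 c2 : Int × Int) : Int × Int :=
  (c1.1 * c2.1 - c1.2 * c2.2, c1.1 * c2.2 + c1.2 * c2.1)
def verificar_longitud (v1 : List (List (Int × Int))) (v2 : List (Int × Int)) : Bool :=
  v1.length == v2.length
def mat_diagonal (m : Nat) : List (List (Int × Int)) :=
  (List.range m).map (fun i => (List.range m).map (fun j =>
    if i = j then ((1 : Int), (0 : Int)) else (0, 0)))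
def conjugar_vector (c1 : Int × Int) : Int × Int := (c1.1, c1.2 * (-1))
def at_transicion (m1 : List (List (Int × Int))) : List (List (Int × Int)) :=
  (List.range (m1.headD []).length).map (fun j =>
    (List.range m1.length).map (fun i => (m1.getD i []).getD j (0, 0)))
def conjugar_matrix (m1 : List (List (Int × Int))) : List (List (Int × Int)) :=
  (List.range m1.length).map (fun row =>
    (List.range (m1.headD []).length).map (fun column =>
      conjugar_vector ((m1.getD row []).getD column (0, 0))))
def matrix_daga (m1 : List (List (Int × Int))) : List (List (Int × Int)) :=
  let m2 := (List.range m1.length).map (fun i =>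
    (List.range (m1.headD []).length).map (fun j => (m1.getD i []).getD j (0, 0)))
  at_transicion (conjugar_matrix m2)
def mult_matrices (m1 m2 : List (List (Int × Int))) : Option (List (List (Int × Int))) :=
  if (m1.headD []).length = m2.length then
    some ((List.range m1.length).map (fun row =>
      (List.range (m2.headD []).length).map (fun column =>
        (List.range (m1.headD []).length).foldl (fun acc aux =>
          suma_complex acc (umlti_complex ((m1.getD row []).getD aux (0, 0))
                                          ((m2.getD aux []).getD column (0, 0)))) (0, 0))))
  else none
def verifi_mat_unitary (m1 : List (List (Int × Int))) : Bool :=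
  if verificar_longitud m1 (m1.headD []) then
    let maty := mat_diagonal m1.length
    let m2 := matrix_daga m1
    let product := (mult_matrices m1 m2).getD []
    let rest := (List.range m1.length).foldl (fun rest i =>
      (List.range m1.length).foldl (fun rest j =>
        if (product.getD i []).getD j (0, 0) ≠ (maty.getD i []).getD j (0, 0)
        then false else rest) rest) true
    if rest then true else false
  else false
def vmu_dot (r1 r2 : List (Int × Int)) (n : Nat) : Int × Int :=
  (List.range n).foldl (fun acc k =>
    let a := (r1.getD k (0, 0)).1
    let b := (r1.getD k (0, 0)).2
    let c := (r2.getD k (0, 0)).1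
    let d := (r2.getD k (0, 0)).2
    (acc.1 + (a * c + b * d), acc.2 + (b * c - a * d))) (0, 0)
def verifi_mat_unitary_alt (m1 : List (List (Int × Int))) : Bool :=
  let n := m1.length
  if n ≠ (m1.headD []).length then false
  else (List.range n).all (fun i => (List.range n).all (fun j =>
    vmu_dot (m1.getD i []) (m1.getD j []) n
      == (if i = j then ((1 : Int), (0 : Int)) else (0, 0))))




-- ===== PRECONDITION & SPEC =====
-- Pre_ excludes exactly the inputs where the Python A raises IndexError: the empty matrix
-- (A indexes m1[0]) and square-headed matrices with a row shorter than the side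
-- (A indexes the missing entries while multiplying).
def Pre_verifi_mat_unitary (m1 : List (List (Int × Int))) : Prop :=
  m1 ≠ [] ∧ ((m1.headD []).length = m1.length → ∀ r ∈ m1, m1.length ≤ r.length)
instance (m1 : List (List (Int × Int))) : Decidable (Pre_verifi_mat_unitary m1) := by
  unfold Pre_verifi_mat_unitary; infer_instance

def pvWitness_verifi_mat_unitary : (List (List (Int × Int))) :=
  [[(1, 0), (0, 0)], [(0, 0), (1, 0)]]

def Spec_verifi_mat_unitary (m1 : List (List (Int × Int))) (out : Bool) : Prop := out = verifi_mat_unitary_alt m1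
instance (m1 : List (List (Int × Int))) (out : Bool) : Decidable (Spec_verifi_mat_unitary m1 out) := by unfold Spec_verifi_mat_unitary; infer_instance

-- ===== CLAIM (what is proved, stated in full; the proofs are below) =====
def Claim_equal_verifi_mat_unitary : Prop := ∀ (m1 : List (List (Int × Int))), Dom_verifi_mat_unitary m1 → Pre_verifi_mat_unitary m1 → Spec_verifi_mat_unitary m1 (verifi_mat_unitary m1)

-- ===== LEMMAS AND PROOFS =====

theorem vmu_getD_range_map {α : Type} (n i : Nat) (f : Nat → α) (d : α) (h : i < n) :
    ((List.range n).map f).getD i d = f i := by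
  simp [List.getD_eq_getElem?_getD, h]

theorem vmu_headD_range_map {α : Type} (n : Nat) (f : Nat → α) (d : α) (h : 0 < n) :
    ((List.range n).map f).headD d = f 0 := by
  have h0 : ((List.range n).map f).headD d = ((List.range n).map f).getD 0 d := by
    cases hl : (List.range n).map f <;> simp
  rw [h0, vmu_getD_range_map n 0 f d h]

theorem vmu_all_congr {α : Type} {l : List α} {f g : α → Bool}
    (h : ∀ x ∈ l, f x = g x) : l.all f = l.all g := by
  induction l with
  | nil => rfl
  | cons x xs ih =>
    simp only [List.all_cons, h x (by simp), ih (fun y hy => h y (by simp [hy]))]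

theorem vmu_foldl_flag {α : Type} (l : List α) (q : α → Prop) [DecidablePred q] (b : Bool) :
    l.foldl (fun rest x => if q x then false else rest) b
      = (b && l.all (fun x => !decide (q x))) := by
  induction l generalizing b with
  | nil => simp
  | cons x xs ih =>
    simp only [List.foldl_cons, List.all_cons]
    by_cases h : q x
    · rw [if_pos h, ih false]
      simp [h]
    · rw [if_neg h, ih b]
      simp [h]

theorem vmu_foldl_and {α : Type} (l : List α) (g : α → Bool) (b : Bool) :
    l.foldl (fun rest x => rest && g x) b = (b && l.all g) := by
  induction l generalizing b with
  | nil => simp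
  | cons x xs ih => simp [ih, Bool.and_assoc]

theorem vmu_nested_flag (n : Nat) (P : Nat → Nat → Prop) [inst : ∀ i j, Decidable (P i j)] :
    (if ((List.range n).foldl (fun rest i => (List.range n).foldl (fun rest j =>
        if P i j then false else rest) rest) true) then true else false)
      = (List.range n).all (fun i => (List.range n).all (fun j => !decide (P i j))) := by
  have hf : (fun (rest : Bool) (i : Nat) => (List.range n).foldl (fun rest j =>
        if P i j then false else rest) rest)
      = (fun rest i => rest && (List.range n).all (fun j => !decide (P i j))) := by
    funext rest i
    exact vmu_foldl_flag _ _ _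
  rw [hf, vmu_foldl_and]
  cases h : (List.range n).all (fun i => (List.range n).all (fun j => !decide (P i j))) <;>
    simp [h]

theorem vmu_conjugar_matrix_rangemap (n L : Nat) (hpos : 0 < n) (f : Nat → Nat → Int × Int) :
    conjugar_matrix ((List.range n).map (fun i => (List.range L).map (f i))) =
      (List.range n).map (fun i => (List.range L).map (fun j => conjugar_vector (f i j))) := by
  unfold conjugar_matrix
  rw [List.length_map, List.length_range, vmu_headD_range_map n _ [] hpos,
    List.length_map, List.length_range]
  apply List.map_congr_left
  intro i hi
  rw [List.mem_range] at hi
  apply List.map_congr_left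
  intro j hj
  rw [List.mem_range] at hj
  rw [vmu_getD_range_map n i _ [] hi, vmu_getD_range_map L j _ (0, 0) hj]

theorem vmu_at_transicion_rangemap (n L : Nat) (hpos : 0 < n) (f : Nat → Nat → Int × Int) :
    at_transicion ((List.range n).map (fun i => (List.range L).map (f i))) =
      (List.range L).map (fun j => (List.range n).map (fun i => f i j)) := by
  unfold at_transicion
  rw [List.length_map, List.length_range, vmu_headD_range_map n _ [] hpos,
    List.length_map, List.length_range]
  apply List.map_congr_left
  intro j hj
  rw [List.mem_range] at hj
  apply List.map_congr_left
  intro i hi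
  rw [List.mem_range] at hi
  rw [vmu_getD_range_map n i _ [] hi, vmu_getD_range_map L j _ (0, 0) hj]

theorem verifi_spec_aux (m1 : List (List (Int × Int))) :
    verifi_mat_unitary m1 = verifi_mat_unitary_alt m1 := by
  show (if (m1.length == (m1.headD []).length) then
      (if ((List.range m1.length).foldl (fun rest i =>
          (List.range m1.length).foldl (fun rest j =>
            if ((((mult_matrices m1 (matrix_daga m1)).getD []).getD i []).getD j (0, 0)) ≠
                (((mat_diagonal m1.length).getD i []).getD j (0, 0))
            then false else rest) rest) true)
        then true else false)
      else false)
    = (if m1.length ≠ (m1.headD []).length then false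
      else (List.range m1.length).all (fun i => (List.range m1.length).all (fun j =>
        vmu_dot (m1.getD i []) (m1.getD j []) m1.length
          == (if i = j then ((1 : Int), (0 : Int)) else (0, 0)))))
  by_cases hsq : m1.length = (m1.headD []).length
  case neg =>
    rw [if_neg (by simpa using hsq), if_pos hsq]
  case pos =>
    cases hm : m1 with
    | nil => decide
    | cons r0 rs =>
    rw [← hm]
    have hpos : 0 < m1.length := by rw [hm]; simp
    set n : Nat := m1.length with hn
    set E : Nat → Nat → Int × Int := fun i j => (m1.getD i []).getD j (0, 0) with hE
    have hdaga : matrix_daga m1 =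
        (List.range n).map (fun j => (List.range n).map (fun i =>
          conjugar_vector (E i j))) := by
      show at_transicion (conjugar_matrix ((List.range n).map (fun i =>
        (List.range (m1.headD []).length).map (fun j => E i j)))) = _
      rw [← hsq]
      rw [vmu_conjugar_matrix_rangemap n n hpos E,
        vmu_at_transicion_rangemap n n hpos (fun i j => conjugar_vector (E i j))]
    have hprod : mult_matrices m1 (matrix_daga m1) =
        some ((List.range n).map (fun row => (List.range n).map (fun col =>
          vmu_dot (m1.getD row []) (m1.getD col []) n))) := by
      rw [hdaga]
      unfold mult_matrices
      rw [← hsq]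
      rw [List.length_map, List.length_range, if_pos rfl,
        vmu_headD_range_map n _ [] hpos, List.length_map, List.length_range]
      congr 1
      apply List.map_congr_left
      intro row hrow
      rw [List.mem_range] at hrow
      apply List.map_congr_left
      intro col hcol
      rw [List.mem_range] at hcol
      unfold vmu_dot
      apply List.foldl_ext
      intro acc k hk
      rw [List.mem_range] at hk
      rw [vmu_getD_range_map n k _ [] hk, vmu_getD_range_map n col _ (0, 0) hcol]
      show suma_complex acc (umlti_complex (E row k) (conjugar_vector (E col k))) = _
      unfold suma_complex umlti_complex conjugar_vector
      simp only [hE, Prod.mk.injEq]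
      constructor <;> ring
    rw [if_pos (by simp [hsq]), if_neg (not_not_intro hsq)]
    rw [hprod, Option.getD_some]
    rw [vmu_nested_flag n (fun i j =>
      ((((List.range n).map (fun row => (List.range n).map (fun col =>
          vmu_dot (m1.getD row []) (m1.getD col []) n))).getD i []).getD j (0, 0)) ≠
        (((mat_diagonal n).getD i []).getD j (0, 0)))]
    apply vmu_all_congr
    intro i hi
    rw [List.mem_range] at hi
    apply vmu_all_congr
    intro j hj
    rw [List.mem_range] at hj
    rw [vmu_getD_range_map n i _ [] hi, vmu_getD_range_map n j _ (0, 0) hj]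
    show (!decide (vmu_dot (m1.getD i []) (m1.getD j []) n ≠
        ((mat_diagonal n).getD i []).getD j (0, 0))) = _
    unfold mat_diagonal
    rw [vmu_getD_range_map n i _ [] hi, vmu_getD_range_map n j _ (0, 0) hj]
    simp only [ne_eq, decide_not, Bool.not_not]
    exact (Bool.beq_eq_decide_eq _ _).symm

-- ===== VERDICT (by name: the statement is the Claim_ definition above) =====
theorem verifi_mat_unitary_spec : Claim_equal_verifi_mat_unitary := by
  intro m1 _ _
  unfold Spec_verifi_mat_unitary
  exact verifi_spec_aux m1
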